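-- pv_equiv track=rewrite | github.com/Obertura777/Pybert | utils/daide.py | sanitize_daide
-- ===== SOURCE A (Python) =====
-- from typing import List
--
-- def sanitize_daide(daide: str, result:List[str]) -> List[str]:
--     """
--         Function to sanitize messy daide format e.g., no spaces between items
--         Assumes string only contains 3-letter daide tokens, spaces, and parens
--     """
--     if len(daide) > 0:
--         first = daide[0]
--         item, rest = None, None
--
--         if first.isspace():
--             return sanitize_daide(daide[1:], result)
--         elif first.isalpha() and first.isupper():
--             item, rest = daide[:3], daide[3:]
--         else:
--             # assume is braces
--             item, rest = daide[:1], daide[1:]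
--         appended = result.copy()
--         appended.append(item)
--         return sanitize_daide(rest, appended)
--     else:
--         return result
-- ===== SOURCE B (Python) =====
-- def sanitize_daide(daide: str, result):
--     out = list(result)
--     i = 0
--     n = len(daide)
--     while i < n:
--         c = daide[i]
--         if c.isspace():
--             i += 1
--         elif c.isalpha() and c.isupper():
--             out.append(daide[i:i+3])
--             i += 3
--         else:
--             out.append(daide[i:i+1])
--             i += 1
--     return out
-- ===== Notes on version B (the rewrite author's own statement) =====
-- stated objective: faster
-- what changed: Replaces A's recursion that slices a fresh suffix string and copies the accumulator list at every step with a single index-driven while loop appending to one output list.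
import Mathlib
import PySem

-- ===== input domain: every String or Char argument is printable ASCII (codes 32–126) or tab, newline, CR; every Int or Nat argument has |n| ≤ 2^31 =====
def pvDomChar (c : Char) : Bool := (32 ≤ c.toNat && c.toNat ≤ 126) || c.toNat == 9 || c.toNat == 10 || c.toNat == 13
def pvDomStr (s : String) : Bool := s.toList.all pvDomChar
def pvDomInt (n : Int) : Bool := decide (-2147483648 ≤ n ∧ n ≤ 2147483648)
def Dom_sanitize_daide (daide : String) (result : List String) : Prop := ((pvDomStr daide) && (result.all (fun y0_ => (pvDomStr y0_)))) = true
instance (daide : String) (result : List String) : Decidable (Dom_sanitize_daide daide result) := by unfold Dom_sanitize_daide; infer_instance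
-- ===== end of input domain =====

-- B replaces A's suffix-slicing recursion (which copies the accumulator at every step)
-- with a single index-driven loop appending to one output list; return values are equal
-- (A may return the very input list object on empty daide, B returns an equal copy).

-- ===== PORT A =====
-- A recurses on the string; ported on the code-point list (daide[1:]/[:3]/[3:]/[:1] are
-- tail/take 3/drop 3/take 1, exact for these nonnegative slice bounds; isspace/isalpha/
-- isupper via PySem, exact on the ASCII domain). result.copy()+append = result ++ [item].
def sanitize_daide_go : List Char → List String → List String
  | [], result => result
  | first :: rest, result =>
    let l := first :: rest
    if PySem.Chars.isspace first then
      sanitize_daide_go rest result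
    else if PySem.Chars.isalpha first && PySem.Chars.isupper first then
      sanitize_daide_go (l.drop 3) (result ++ [String.ofList (l.take 3)])
    else
      sanitize_daide_go rest (result ++ [String.ofList (l.take 1)])
termination_by l _ => l.length
decreasing_by all_goals (simp only [List.length_drop, List.length_cons]; omega)

def sanitize_daide (daide : String) (result : List String) : List String :=
  sanitize_daide_go daide.toList result

-- ===== PORT B =====
-- B's while loop: index i into the unchanged string, accumulator out; daide[i:i+3] and
-- daide[i:i+1] are (drop i).take 3 / (drop i).take 1 (nonnegative in-range bounds, exact).
def sanitize_daide_alt_go (s : List Char) (i : Nat) (out : List String) : List String :=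
  if h : i < s.length then
    let c := s[i]
    if PySem.Chars.isspace c then
      sanitize_daide_alt_go s (i + 1) out
    else if PySem.Chars.isalpha c && PySem.Chars.isupper c then
      sanitize_daide_alt_go s (i + 3) (out ++ [String.ofList ((s.drop i).take 3)])
    else
      sanitize_daide_alt_go s (i + 1) (out ++ [String.ofList ((s.drop i).take 1)])
  else out
termination_by s.length - i

def sanitize_daide_alt (daide : String) (result : List String) : List String :=
  sanitize_daide_alt_go daide.toList 0 result

-- ===== PRECONDITION & SPEC =====
def Spec_sanitize_daide (daide : String) (result : List String) (out : List String) : Prop := out = sanitize_daide_alt daide result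
instance (daide : String) (result : List String) (out : List String) : Decidable (Spec_sanitize_daide daide result out) := by unfold Spec_sanitize_daide; infer_instance

-- ===== CLAIM (what is proved, stated in full; the proofs are below) =====
def Claim_equal_sanitize_daide : Prop := ∀ (daide : String) (result : List String), Dom_sanitize_daide daide result → Spec_sanitize_daide daide result (sanitize_daide daide result)

-- ===== LEMMAS AND PROOFS =====

-- B's loop at position i computes A's recursion on the suffix s.drop i.
theorem alt_go_eq_go (s : List Char) (i : Nat) (out : List String) :
    sanitize_daide_alt_go s i out = sanitize_daide_go (s.drop i) out := by
  induction i, out using sanitize_daide_alt_go.induct s with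
  | case1 i out h c hsp ih =>
    have hsp' : PySem.Chars.isspace s[i] = true := hsp
    rw [sanitize_daide_alt_go]
    simp only [dif_pos h]
    conv_rhs => rw [List.drop_eq_getElem_cons h, sanitize_daide_go]
    simp [hsp', ih]
  | case2 i out h c hsp hup ih =>
    have hsp' : PySem.Chars.isspace s[i] = false := by simpa using hsp
    have hup' : PySem.Chars.isalpha s[i] = true ∧ PySem.Chars.isupper s[i] = true := by simpa using hup
    have h3 : (s.drop i).drop 3 = s.drop (i + 3) := by
      rw [List.drop_drop]
    rw [sanitize_daide_alt_go]
    simp only [dif_pos h]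
    conv_rhs => rw [List.drop_eq_getElem_cons h, sanitize_daide_go]
    rw [← List.drop_eq_getElem_cons h, h3] at *
    simp [hsp', hup', ih]
  | case3 i out h c hsp hup ih =>
    have hsp' : PySem.Chars.isspace s[i] = false := by simpa using hsp
    have hup' : ¬ (PySem.Chars.isalpha s[i] = true ∧ PySem.Chars.isupper s[i] = true) := by
      simpa using hup
    rw [sanitize_daide_alt_go]
    simp only [dif_pos h]
    conv_rhs => rw [List.drop_eq_getElem_cons h, sanitize_daide_go]
    rw [← List.drop_eq_getElem_cons h] at *
    simp [hsp', hup', ih]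
  | case4 i out h =>
    rw [sanitize_daide_alt_go]
    have hd : s.drop i = [] := List.drop_eq_nil_of_le (by omega)
    simp [h, hd, sanitize_daide_go]

-- ===== VERDICT (by name: the statement is the Claim_ definition above) =====
theorem sanitize_daide_spec : Claim_equal_sanitize_daide := by
  intro daide result _
  unfold Spec_sanitize_daide sanitize_daide sanitize_daide_alt
  rw [alt_go_eq_go, List.drop_zero]
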